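-- pv_equiv track=rewrite | github.com/huzecong/gsa-ultra-2020 | roshambolic.py | solution
-- ===== SOURCE A (Python) =====
-- def solution(a: str, b: str):
--     qa = list(reversed(a))
--     qb = list(reversed(b))
--     for a, b in zip(qa, qb):
--         if a == b:
--             qa.append(a)
--             qb.append(b)
--         elif a + b in {"RS", "SP", "PR"}:
--             qa += [b, a]
--         else:
--             qb += [a, b]
--     return min(len(qa), len(qb))
-- ===== SOURCE B (Python) =====
-- def solution(a: str, b: str):
--     qa = list(reversed(a))
--     qb = list(reversed(b))
--     rounds = 0
--     while qa and qb:
--         k = min(len(qa), len(qb))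
--         pairs = list(zip(qa[:k], qb[:k]))
--         adda = [c for x, y in pairs
--                 for c in ([x] if x == y else [y, x] if x + y in ("RS", "SP", "PR") else [])]
--         addb = [c for x, y in pairs
--                 for c in ([y] if x == y else [] if x + y in ("RS", "SP", "PR") else [x, y])]
--         qa = qa[k:] + adda
--         qb = qb[k:] + addb
--         rounds += k
--     return rounds
-- ===== Notes on version B (the rewrite author's own statement) =====
-- stated objective: alternative
-- what changed: B simulates the war in batched phases: each phase zips the two current queue fronts (min length), builds both queues' appended cards with flat list comprehensions, rebuilds the queues by slicing and adds the phase length to a round counter, whereas A mutates two ever-growing lists round-by-round under a zip index and reads the answer off as the minimum of the final lengths; correct because no queue can empty mid-phase, so the answer equals the total number of rounds.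
import Mathlib
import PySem

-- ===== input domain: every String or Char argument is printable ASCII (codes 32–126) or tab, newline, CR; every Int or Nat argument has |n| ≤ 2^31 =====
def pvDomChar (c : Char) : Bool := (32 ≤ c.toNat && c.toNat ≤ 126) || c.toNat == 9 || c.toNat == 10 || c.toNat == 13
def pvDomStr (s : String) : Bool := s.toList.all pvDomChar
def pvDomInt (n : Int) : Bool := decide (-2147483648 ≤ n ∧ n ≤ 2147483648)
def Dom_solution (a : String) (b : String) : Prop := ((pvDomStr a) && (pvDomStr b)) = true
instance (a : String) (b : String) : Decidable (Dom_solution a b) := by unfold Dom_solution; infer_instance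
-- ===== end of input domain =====

-- B replaces A's round-by-round mutation of two ever-growing lists under a zip index
-- (answer = min of the final lengths) by a batched simulation: each phase zips the two
-- current queue fronts, rebuilds both queues by slicing plus flat-mapped appends, and
-- counts the rounds; the return values agree on every terminating input (Pre_).

-- ===== PORT A =====
-- 'a + b in {"RS", "SP", "PR"}'
def pvWinA (x y : Char) : Bool := (x == 'R' && y == 'S') || (x == 'S' && y == 'P') || (x == 'P' && y == 'R')

-- fuel for the Lean recursions (the Python loops are unbounded); (n+2)^(n+2) exceeds the
-- number (n+1)·n! of possible game states of a deck of n cards, so a terminating game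
-- (whose states are pairwise distinct) always ends strictly within this fuel
def pvFuel (a : String) (b : String) : Nat :=
  (a.toList.length + b.toList.length + 2) ^ (a.toList.length + b.toList.length + 2)

-- 'for a, b in zip(qa, qb)' over the growing lists = index loop while i < len qa ∧ i < len qb
def loopA : Nat → List Char → List Char → Nat → (List Char × List Char)
  | 0, qa, qb, _ => (qa, qb)
  | f + 1, qa, qb, i =>
    match qa[i]?, qb[i]? with
    | some x, some y =>
      if x == y then loopA f (qa ++ [x]) (qb ++ [y]) (i + 1)
      else if pvWinA x y then loopA f (qa ++ [y, x]) qb (i + 1)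
      else loopA f qa (qb ++ [x, y]) (i + 1)
    | _, _ => (qa, qb)

def solution (a : String) (b : String) : Int :=
  let qa := a.toList.reverse
  let qb := b.toList.reverse
  let r := loopA (pvFuel a b) qa qb 0
  Int.ofNat (min r.1.length r.2.length)

-- ===== PORT B =====
def pvBeats (x y : Char) : Bool := (x == 'R' && y == 'S') || (x == 'S' && y == 'P') || (x == 'P' && y == 'R')

-- cards one pair (x, y) contributes to the back of qa / of qb
def pvAddA (p : Char × Char) : List Char :=
  if p.1 == p.2 then [p.1] else if pvBeats p.1 p.2 then [p.2, p.1] else []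
def pvAddB (p : Char × Char) : List Char :=
  if p.1 == p.2 then [p.2] else if pvBeats p.1 p.2 then [] else [p.1, p.2]

-- 'while qa and qb': one phase = min(len qa, len qb) rounds, processed as a batch
def loopB : Nat → List Char → List Char → Int → Int
  | 0, _, _, c => c
  | f + 1, qa, qb, c =>
    if qa.isEmpty || qb.isEmpty then c
    else
      let k := min qa.length qb.length
      let pairs := (qa.take k).zip (qb.take k)
      loopB f (qa.drop k ++ pairs.flatMap pvAddA) (qb.drop k ++ pairs.flatMap pvAddB)
        (c + (k : Int))

def solution_alt (a : String) (b : String) : Int :=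
  loopB (pvFuel a b) a.toList.reverse b.toList.reverse 0

-- ===== PRECONDITION & SPEC =====
-- one round of the game (identity on a finished state); independent of both ports
def pvStep : List Char × List Char → List Char × List Char
  | (x :: ta, y :: tb) =>
    if x == y then (ta ++ [x], tb ++ [y])
    else if (x == 'R' && y == 'S') || (x == 'S' && y == 'P') || (x == 'P' && y == 'R') then
      (ta ++ [y, x], tb)
    else (ta, tb ++ [x, y])
  | s => s

-- termination checker: plays the deterministic game recording every visited state; true as
-- soon as a queue empties, false as soon as a state repeats (the game then loops forever)
def pvCheck : Nat → List (List Char × List Char) → List Char × List Char → Bool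
  | _, _, ([], _) => true
  | _, _, (_ :: _, []) => true
  | 0, _, (_ :: _, _ :: _) => false
  | f + 1, seen, s => if s ∈ seen then false else pvCheck f (s :: seen) (pvStep s)

-- Pre_ excludes exactly the inputs on which the Python loop never returns (e.g. a = b = "R"):
-- there A diverges, so nothing can be claimed.  pvCheck stops at the first repeated state
-- (after which the deterministic game cycles forever) or when a queue empties; since a deck
-- of n cards admits fewer than (n+2)^(n+2) states, one of the two always happens strictly
-- within the fuel, so Pre_ holds precisely on the terminating inputs — every input A
-- returns on is admitted.
def Pre_solution (a : String) (b : String) : Prop :=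
  pvCheck (pvFuel a b) [] (a.toList.reverse, b.toList.reverse) = true
instance (a : String) (b : String) : Decidable (Pre_solution a b) := by unfold Pre_solution; infer_instance

def pvWitness_solution : String × String := ("RP", "SS")

def Spec_solution (a : String) (b : String) (out : Int) : Prop := out = solution_alt a b
instance (a : String) (b : String) (out : Int) : Decidable (Spec_solution a b out) := by unfold Spec_solution; infer_instance

-- ===== CLAIM (what is proved, stated in full; the proofs are below) =====
def Claim_equal_solution : Prop := ∀ (a : String) (b : String), Dom_solution a b → Pre_solution a b → Spec_solution a b (solution a b)

-- ===== LEMMAS AND PROOFS =====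

-- proof-layer round-by-round consuming loop, the bridge between the two ports
def pvWinR (x y : Char) : Bool := (x == 'R' && y == 'S') || (x == 'S' && y == 'P') || (x == 'P' && y == 'R')

def loopR : Nat → List Char → List Char → Int → Int
  | 0, _, _, c => c
  | f + 1, qa, qb, c =>
    match qa, qb with
    | x :: ta, y :: tb =>
      if x == y then loopR f (ta ++ [x]) (tb ++ [y]) (c + 1)
      else if pvWinR x y then loopR f (ta ++ [y, x]) tb (c + 1)
      else loopR f ta (tb ++ [x, y]) (c + 1)
    | _, _ => c

-- fuel-bounded 'the game ends within f rounds'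
def pvTerm : Nat → List Char → List Char → Bool
  | _, [], _ => true
  | _, _ :: _, [] => true
  | 0, _ :: _, _ :: _ => false
  | f + 1, x :: ta, y :: tb =>
    if x == y then pvTerm f (ta ++ [x]) (tb ++ [y])
    else if (x == 'R' && y == 'S') || (x == 'S' && y == 'P') || (x == 'P' && y == 'R') then
      pvTerm f (ta ++ [y, x]) tb
    else pvTerm f ta (tb ++ [x, y])

theorem pvCheck_term : ∀ (f : Nat) (seen : List (List Char × List Char)) (qa qb : List Char),
    pvCheck f seen (qa, qb) = true → pvTerm f qa qb = true := by
  intro f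
  induction f with
  | zero =>
    intro seen qa qb h
    cases qa with
    | nil => rfl
    | cons x ta =>
      cases qb with
      | nil => rfl
      | cons y tb => simp [pvCheck] at h
  | succ f ih =>
    intro seen qa qb h
    cases qa with
    | nil => rfl
    | cons x ta =>
      cases qb with
      | nil => rfl
      | cons y tb =>
        rw [show pvCheck (f + 1) seen (x :: ta, y :: tb)
              = if (x :: ta, y :: tb) ∈ seen then false
                else pvCheck f ((x :: ta, y :: tb) :: seen) (pvStep (x :: ta, y :: tb)) from rfl] at h
        by_cases hm : (x :: ta, y :: tb) ∈ seen
        · simp [hm] at h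
        · simp only [hm, if_false] at h
          rw [show pvTerm (f + 1) (x :: ta) (y :: tb)
                = if x == y then pvTerm f (ta ++ [x]) (tb ++ [y])
                  else if (x == 'R' && y == 'S') || (x == 'S' && y == 'P') || (x == 'P' && y == 'R') then
                    pvTerm f (ta ++ [y, x]) tb
                  else pvTerm f ta (tb ++ [x, y]) from rfl]
          by_cases hxy : (x == y) = true
          · have := ih _ _ _ (by simpa [pvStep, hxy] using h)
            simp [hxy, this]
          · by_cases hw : ((x == 'R' && y == 'S') || (x == 'S' && y == 'P') || (x == 'P' && y == 'R')) = true
            · have := ih _ _ _ (by simpa [pvStep, hxy, hw] using h)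
              simp [hxy, hw, this]
            · have := ih _ _ _ (by simpa [pvStep, hxy, hw] using h)
              simp [hxy, hw, this]

theorem pvTerm_min_le : ∀ (f : Nat) (qa qb : List Char), qa ≠ [] → qb ≠ [] →
    pvTerm f qa qb = true → min qa.length qb.length ≤ f := by
  intro f
  induction f with
  | zero =>
    intro qa qb ha hb h
    cases qa with
    | nil => exact absurd rfl ha
    | cons x ta =>
      cases qb with
      | nil => exact absurd rfl hb
      | cons y tb => simp [pvTerm] at h
  | succ f ih =>
    intro qa qb ha hb h
    cases qa with
    | nil => exact absurd rfl ha
    | cons x ta =>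
      cases qb with
      | nil => exact absurd rfl hb
      | cons y tb =>
        rw [show pvTerm (f + 1) (x :: ta) (y :: tb)
              = if x == y then pvTerm f (ta ++ [x]) (tb ++ [y])
                else if (x == 'R' && y == 'S') || (x == 'S' && y == 'P') || (x == 'P' && y == 'R') then
                  pvTerm f (ta ++ [y, x]) tb
                else pvTerm f ta (tb ++ [x, y]) from rfl] at h
        by_cases hxy : (x == y) = true
        · simp only [hxy, if_true] at h
          have := ih (ta ++ [x]) (tb ++ [y]) (by simp) (by simp) h
          simp at this ⊢
          omega
        · simp only [hxy, if_false, Bool.false_eq_true] at h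
          by_cases hw : ((x == 'R' && y == 'S') || (x == 'S' && y == 'P') || (x == 'P' && y == 'R')) = true
          · simp only [hw, if_true] at h
            cases tb with
            | nil => simp
            | cons z tc =>
              have := ih (ta ++ [y, x]) (z :: tc) (by simp) (by simp) h
              simp at this ⊢
              omega
          · simp only [hw, if_false, Bool.false_eq_true] at h
            cases ta with
            | nil => simp
            | cons z tc =>
              have := ih (z :: tc) (tb ++ [x, y]) (by simp) (by simp) h
              simp at this ⊢
              omega

theorem pvTerm_phase : ∀ (j : Nat) (qa qb : List Char) (f : Nat),
    j ≤ qa.length → j ≤ qb.length →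
    pvTerm (j + f) qa qb
      = pvTerm f (qa.drop j ++ ((qa.take j).zip (qb.take j)).flatMap pvAddA)
                 (qb.drop j ++ ((qa.take j).zip (qb.take j)).flatMap pvAddB) := by
  intro j
  induction j with
  | zero => intro qa qb f _ _; simp
  | succ j ih =>
    intro qa qb f ha hb
    cases qa with
    | nil => simp at ha
    | cons x ta =>
      cases qb with
      | nil => simp at hb
      | cons y tb =>
        simp only [List.length_cons, Nat.add_le_add_iff_right] at ha hb
        have hstep : (j + 1) + f = (j + f) + 1 := by omega
        rw [hstep]
        rw [show pvTerm ((j + f) + 1) (x :: ta) (y :: tb)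
              = if x == y then pvTerm (j + f) (ta ++ [x]) (tb ++ [y])
                else if (x == 'R' && y == 'S') || (x == 'S' && y == 'P') || (x == 'P' && y == 'R') then
                  pvTerm (j + f) (ta ++ [y, x]) tb
                else pvTerm (j + f) ta (tb ++ [x, y]) from rfl]
        simp only [List.drop_succ_cons, List.take_succ_cons, List.zip_cons_cons,
          List.flatMap_cons]
        by_cases hxy : (x == y) = true
        · simp only [hxy, if_true]
          rw [ih (ta ++ [x]) (tb ++ [y]) f (by simp; omega) (by simp; omega)]
          rw [List.take_append_of_le_length ha, List.take_append_of_le_length hb,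
            List.drop_append_of_le_length ha, List.drop_append_of_le_length hb]
          simp [pvAddA, pvAddB, hxy]
        · simp only [hxy, if_false, Bool.false_eq_true]
          by_cases hw : ((x == 'R' && y == 'S') || (x == 'S' && y == 'P') || (x == 'P' && y == 'R')) = true
          · simp only [hw, if_true]
            rw [ih (ta ++ [y, x]) tb f (by simp; omega) hb]
            rw [List.take_append_of_le_length ha, List.drop_append_of_le_length ha]
            simp [pvAddA, pvAddB, pvBeats, hxy, hw]
          · simp only [hw, if_false, Bool.false_eq_true]
            rw [ih ta (tb ++ [x, y]) f ha (by simp; omega)]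
            rw [List.take_append_of_le_length hb, List.drop_append_of_le_length hb]
            have hw' : pvBeats x y = false := by simpa [pvBeats] using hw
            simp [pvAddA, pvAddB, hxy, hw']

theorem loopR_phase : ∀ (j : Nat) (qa qb : List Char) (f : Nat) (c : Int),
    j ≤ qa.length → j ≤ qb.length →
    loopR (j + f) qa qb c
      = loopR f (qa.drop j ++ ((qa.take j).zip (qb.take j)).flatMap pvAddA)
                (qb.drop j ++ ((qa.take j).zip (qb.take j)).flatMap pvAddB) (c + (j : Int)) := by
  intro j
  induction j with
  | zero => intro qa qb f c _ _; simp
  | succ j ih =>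
    intro qa qb f c ha hb
    cases qa with
    | nil => simp at ha
    | cons x ta =>
      cases qb with
      | nil => simp at hb
      | cons y tb =>
        simp only [List.length_cons, Nat.add_le_add_iff_right] at ha hb
        have hstep : (j + 1) + f = (j + f) + 1 := by omega
        rw [hstep]
        rw [show loopR ((j + f) + 1) (x :: ta) (y :: tb) c
              = if x == y then loopR (j + f) (ta ++ [x]) (tb ++ [y]) (c + 1)
                else if pvWinR x y then loopR (j + f) (ta ++ [y, x]) tb (c + 1)
                else loopR (j + f) ta (tb ++ [x, y]) (c + 1) from rfl]
        simp only [List.drop_succ_cons, List.take_succ_cons, List.zip_cons_cons,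
          List.flatMap_cons]
        have hc : c + 1 + (j : Int) = c + ((j : Nat) + 1 : Int) := by omega
        by_cases hxy : (x == y) = true
        · simp only [hxy, if_true]
          rw [ih (ta ++ [x]) (tb ++ [y]) f (c + 1) (by simp; omega) (by simp; omega)]
          rw [List.take_append_of_le_length ha, List.take_append_of_le_length hb,
            List.drop_append_of_le_length ha, List.drop_append_of_le_length hb]
          rw [hc]
          simp [pvAddA, pvAddB, hxy]
        · simp only [hxy, if_false, Bool.false_eq_true]
          by_cases hw : pvWinR x y = true
          · simp only [hw, if_true]
            rw [ih (ta ++ [y, x]) tb f (c + 1) (by simp; omega) hb]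
            rw [List.take_append_of_le_length ha, List.drop_append_of_le_length ha]
            rw [hc]
            have hw' : pvBeats x y = true := by simpa [pvBeats] using (by simpa [pvWinR] using hw)
            simp [pvAddA, pvAddB, hxy, hw']
          · simp only [hw, if_false, Bool.false_eq_true]
            rw [ih ta (tb ++ [x, y]) f (c + 1) ha (by simp; omega)]
            rw [List.take_append_of_le_length hb, List.drop_append_of_le_length hb]
            rw [hc]
            have hw' : pvBeats x y = false := by simpa [pvBeats] using (by simpa [pvWinR] using hw)
            simp [pvAddA, pvAddB, hxy, hw']

theorem loopB_eq_loopR (f : Nat) : ∀ (g : Nat) (qa qb : List Char) (c : Int),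
    pvTerm f qa qb = true → f ≤ g → loopB g qa qb c = loopR f qa qb c := by
  induction f using Nat.strong_induction_on with
  | _ f ih =>
    intro g qa qb c hterm hfg
    cases qa with
    | nil => cases g <;> cases f <;> simp [loopB, loopR]
    | cons x ta =>
      cases qb with
      | nil => cases g <;> cases f <;> simp [loopB, loopR]
      | cons y tb =>
        have hmin : min (x :: ta).length (y :: tb).length ≤ f :=
          pvTerm_min_le f _ _ (by simp) (by simp) hterm
        have hk1 : 1 ≤ min (x :: ta).length (y :: tb).length := by simp
        cases g with
        | zero => omega
        | succ g' =>
          rw [show loopB (g' + 1) (x :: ta) (y :: tb) c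
                = loopB g'
                    ((x :: ta).drop (min (x :: ta).length (y :: tb).length)
                      ++ (((x :: ta).take (min (x :: ta).length (y :: tb).length)).zip
                          ((y :: tb).take (min (x :: ta).length (y :: tb).length))).flatMap pvAddA)
                    ((y :: tb).drop (min (x :: ta).length (y :: tb).length)
                      ++ (((x :: ta).take (min (x :: ta).length (y :: tb).length)).zip
                          ((y :: tb).take (min (x :: ta).length (y :: tb).length))).flatMap pvAddB)
                    (c + ((min (x :: ta).length (y :: tb).length : Nat) : Int)) from rfl]
          have hf : f = min (x :: ta).length (y :: tb).length
              + (f - min (x :: ta).length (y :: tb).length) := by omega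
          rw [hf] at hterm
          rw [pvTerm_phase _ _ _ _ (Nat.min_le_left _ _) (Nat.min_le_right _ _)] at hterm
          have hrec := ih (f - min (x :: ta).length (y :: tb).length) (by omega) g' _ _
            (c + ((min (x :: ta).length (y :: tb).length : Nat) : Int)) hterm (by omega)
          rw [hrec]
          conv_rhs => rw [hf]
          rw [loopR_phase _ _ _ _ _ (Nat.min_le_left _ _) (Nat.min_le_right _ _)]

theorem loopA_eq_loopR : ∀ (f : Nat) (qa qb : List Char) (i : Nat),
    i ≤ qa.length → i ≤ qb.length →
    pvTerm f (qa.drop i) (qb.drop i) = true →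
    Int.ofNat (min (loopA f qa qb i).1.length (loopA f qa qb i).2.length)
      = loopR f (qa.drop i) (qb.drop i) (Int.ofNat i) := by
  intro f
  induction f with
  | zero =>
    intro qa qb i ha hb hterm
    have hlen : (qa.drop i).length = qa.length - i := List.length_drop
    have hlen' : (qb.drop i).length = qb.length - i := List.length_drop
    cases hra : qa.drop i with
    | nil =>
      simp only [loopA, loopR]
      have : qa.length = i := by
        have := congrArg List.length hra; simp [hlen] at this ⊢; omega
      simp [this]; omega
    | cons x ta =>
      cases hrb : qb.drop i with
      | nil =>
        simp only [loopA, loopR]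
        have : qb.length = i := by
          have := congrArg List.length hrb; simp [hlen'] at this ⊢; omega
        simp [this]; omega
      | cons y tb => simp [pvTerm, hra, hrb] at hterm
  | succ f ih =>
    intro qa qb i ha hb hterm
    cases hra : qa.drop i with
    | nil =>
      have hqa : qa[i]? = none := by
        rw [← List.head?_drop, hra]; rfl
      have hlen : qa.length = i := by
        have := congrArg List.length hra; simp at this; omega
      simp only [loopA, loopR, hqa]
      cases hrb : qb.drop i <;> simp [hlen] <;> omega
    | cons x ta =>
      cases hrb : qb.drop i with
      | nil =>
        have hqb : qb[i]? = none := by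
          rw [← List.head?_drop, hrb]; rfl
        have hlen : qb.length = i := by
          have := congrArg List.length hrb; simp at this; omega
        simp only [loopA, loopR, hqb]
        cases hqa : qa[i]? <;> simp [hlen] <;> omega
      | cons y tb =>
        have hqa : qa[i]? = some x := by rw [← List.head?_drop, hra]; rfl
        have hqb : qb[i]? = some y := by rw [← List.head?_drop, hrb]; rfl
        have hia : i < qa.length := (List.getElem?_eq_some_iff.mp hqa).1
        have hib : i < qb.length := (List.getElem?_eq_some_iff.mp hqb).1
        have hta : qa.drop (i + 1) = ta := by
          have : (qa.drop i).drop 1 = qa.drop (i + 1) := by rw [List.drop_drop]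
          rw [← this, hra]; rfl
        have htb : qb.drop (i + 1) = tb := by
          have : (qb.drop i).drop 1 = qb.drop (i + 1) := by rw [List.drop_drop]
          rw [← this, hrb]; rfl
        have hcast : Int.ofNat i + 1 = Int.ofNat (i + 1) := by simp
        simp only [loopA, loopR, hqa, hqb]
        simp only [pvTerm, hra, hrb] at hterm
        by_cases hxy : (x == y) = true
        · simp only [hxy, if_true]
          have e1 : (qa ++ [x]).drop (i + 1) = ta ++ [x] := by
            rw [List.drop_append_of_le_length hia, hta]
          have e2 : (qb ++ [y]).drop (i + 1) = tb ++ [y] := by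
            rw [List.drop_append_of_le_length hib, htb]
          have := ih (qa ++ [x]) (qb ++ [y]) (i + 1)
            (by simp; omega) (by simp; omega) (by rw [e1, e2]; simpa [hxy] using hterm)
          rw [hcast, ← e1, ← e2]; simpa using this
        · simp only [hxy, if_false, Bool.false_eq_true]
          by_cases hwin : pvWinA x y = true
          · have hwin' : ((x == 'R' && y == 'S') || (x == 'S' && y == 'P') || (x == 'P' && y == 'R')) = true := by
              simpa [pvWinA] using hwin
            simp only [hwin, if_true, pvWinR, hwin']
            have e1 : (qa ++ [y, x]).drop (i + 1) = ta ++ [y, x] := by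
              rw [List.drop_append_of_le_length hia, hta]
            have := ih (qa ++ [y, x]) qb (i + 1)
              (by simp; omega) (by omega) (by rw [e1, htb]; simpa [hxy, hwin'] using hterm)
            rw [hcast, ← e1, ← htb]; simpa using this
          · have hwin' : ((x == 'R' && y == 'S') || (x == 'S' && y == 'P') || (x == 'P' && y == 'R')) = false := by
              simpa [pvWinA] using hwin
            simp only [hwin, if_false, pvWinR, hwin', Bool.false_eq_true]
            have e2 : (qb ++ [x, y]).drop (i + 1) = tb ++ [x, y] := by
              rw [List.drop_append_of_le_length hib, htb]
            have := ih qa (qb ++ [x, y]) (i + 1)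
              (by omega) (by simp; omega) (by rw [e2, hta]; simpa [hxy, hwin'] using hterm)
            rw [hcast, ← e2, ← hta]; simpa using this

-- ===== VERDICT (by name: the statement is the Claim_ definition above) =====
theorem solution_spec : Claim_equal_solution := by
  intro a b _ hpre
  unfold Pre_solution at hpre
  unfold Spec_solution solution solution_alt
  have hterm : pvTerm (pvFuel a b) a.toList.reverse b.toList.reverse = true :=
    pvCheck_term _ _ _ _ hpre
  have h1 := loopA_eq_loopR (pvFuel a b) a.toList.reverse b.toList.reverse 0
    (Nat.zero_le _) (Nat.zero_le _) (by simpa using hterm)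
  have h2 := loopB_eq_loopR (pvFuel a b) (pvFuel a b) a.toList.reverse b.toList.reverse 0
    hterm le_rfl
  rw [h2]
  simpa using h1
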